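-- pv_equiv track=rewrite | github.com/TGITS/programming-workouts | erri/highschool/cs/premiere/TP_CH8/exercice_2.py | ressemble
-- ===== SOURCE A (Python) =====
-- def ressemble(num: str, ref:str) -> bool:
--     '''Prédicat qui teste si un numéro avec des caractères éventuellement masqués par des "*" correspond à un numéro de référence
--
--     num : le numéro à tester
--     ref : le numéro de référence
--
--     num et ref doivent faire la même taille, si ce n'est pas le cas la fonction retourne False
--     '''
--     # On s'assure que les 2 chaines ont bien la même taille
--     if (len(num) != len(ref)):
--         return False
--
--     size = len(num)
--     i = 0
--     # L'idée est de comparer la caractères à la même position dans chacune des chaines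
--     # Si les 2 caractères sont égaux, ou si cela correspond au caractère "*", on peut continuer
--     # Ce qui signifie que si les 2 caractères sont différents et que le caractère dans le numéro à tester n'est pas une "*"
--     # alors on poeut retourner False directement
--     # Par cotnre si on arrive au bout de la boucle sans être sortie, c'est qu'on doit retourner True
--     while i < size:
--         if (num[i] != ref[i]) and (num[i] != "*"):
--             return False
--         i += 1
--
--     return True
-- ===== SOURCE B (Python) =====
-- def ressemble(num: str, ref: str) -> bool:
--     '''Same predicate, chunk-based: split num on '*' into literal fragments and
--     check each fragment occurs in ref at its expected offset, each '*' skipping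
--     exactly one character of ref.'''
--     if len(num) != len(ref):
--         return False
--     pos = 0
--     for part in num.split('*'):
--         if not ref.startswith(part, pos):
--             return False
--         pos += len(part) + 1
--     return True
-- ===== Notes on version B (the rewrite author's own statement) =====
-- stated objective: alternative
-- what changed: A scans character-by-character with an index loop and early return; B instead splits num on '*' into literal chunks and verifies each chunk occurs at its expected offset in ref via str.startswith(part, pos), each '*' skipping one position.
import Mathlib
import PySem

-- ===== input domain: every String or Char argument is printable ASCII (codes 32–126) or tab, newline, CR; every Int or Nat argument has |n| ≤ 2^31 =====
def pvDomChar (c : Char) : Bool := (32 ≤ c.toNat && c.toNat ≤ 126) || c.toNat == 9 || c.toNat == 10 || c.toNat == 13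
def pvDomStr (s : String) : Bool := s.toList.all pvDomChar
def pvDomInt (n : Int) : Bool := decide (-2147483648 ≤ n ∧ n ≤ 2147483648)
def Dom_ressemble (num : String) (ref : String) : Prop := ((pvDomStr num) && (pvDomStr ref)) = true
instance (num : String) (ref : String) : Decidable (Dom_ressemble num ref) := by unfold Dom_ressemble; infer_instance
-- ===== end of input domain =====

-- B replaces A's per-character indexed scan by splitting num on '*' into literal chunks and
-- matching each chunk at its expected offset in ref (objective: alternative, same cost).

-- ===== PORT A =====
-- A's while-loop over index i < size with early return False on a mismatch.
def ressembleGo (num ref : List Char) (size i : Nat) : Bool :=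
  if _h : i < size then
    if num.getD i ' ' ≠ ref.getD i ' ' ∧ num.getD i ' ' ≠ '*' then false
    else ressembleGo num ref size (i + 1)
  else true
termination_by size - i

def ressemble (num : String) (ref : String) : Bool :=
  if num.toList.length ≠ ref.toList.length then false
  else ressembleGo num.toList ref.toList num.toList.length 0

-- ===== PORT B =====
-- B's for-loop over the chunks of num.split('*'), with the running offset pos and early return False.
-- ref.startswith(part, pos) for 0 ≤ pos is exactly: pos ≤ len(ref) and part is a prefix of ref[pos:].
def chunksGo (refL : List Char) (parts : List (List Char)) (pos : Nat) : Bool :=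
  match parts with
  | [] => true
  | p :: ps =>
    if pos ≤ refL.length && p.isPrefixOf (refL.drop pos) then
      chunksGo refL ps (pos + p.length + 1)
    else false

def ressemble_alt (num : String) (ref : String) : Bool :=
  if num.toList.length ≠ ref.toList.length then false
  else chunksGo ref.toList (num.toList.splitOn '*') 0

-- ===== PRECONDITION & SPEC =====
def Spec_ressemble (num : String) (ref : String) (out : Bool) : Prop := out = ressemble_alt num ref
instance (num : String) (ref : String) (out : Bool) : Decidable (Spec_ressemble num ref out) := by unfold Spec_ressemble; infer_instance

-- ===== CLAIM =====
def Claim_equal_ressemble : Prop := ∀ (num : String) (ref : String), Dom_ressemble num ref → Spec_ressemble num ref (ressemble num ref)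

-- ===== LEMMAS AND PROOFS =====

-- Common specification: per-position wildcard match on equally long lists.
def wmatch : List Char → List Char → Bool
  | [], [] => true
  | n :: ns, r :: rs => (n == r || n == '*') && wmatch ns rs
  | _, _ => false

-- A's loop from position i computes wmatch on the dropped suffixes.
theorem ressembleGo_eq_wmatch (l1 l2 : List Char) (hlen : l1.length = l2.length) :
    ∀ i, ressembleGo l1 l2 l1.length i = wmatch (l1.drop i) (l2.drop i) := by
  intro i
  induction' hfi : l1.length - i using Nat.strong_induction_on with n ih generalizing i
  subst hfi
  rw [ressembleGo]
  by_cases h : i < l1.length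
  · have h2 : i < l2.length := hlen ▸ h
    rw [List.drop_eq_getElem_cons h, List.drop_eq_getElem_cons h2]
    simp only [h, dif_pos]
    rw [ih (l1.length - (i+1)) (by omega) (i+1) rfl]
    have hg1 : l1.getD i ' ' = l1[i] := List.getD_eq_getElem l1 ' ' h
    have hg2 : l2.getD i ' ' = l2[i] := List.getD_eq_getElem l2 ' ' h2
    rw [hg1, hg2, wmatch]
    by_cases hc : l1[i] ≠ l2[i] ∧ l1[i] ≠ '*'
    · obtain ⟨hA, hB⟩ := hc
      simp [hA, hB]
    · rcases not_and_or.mp hc with hA | hB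
      · have hxy : l1[i] = l2[i] := not_not.mp hA
        simp [hxy]
      · have hs : l1[i] = '*' := not_not.mp hB
        simp [hs]
  · simp only [h, dif_neg, not_false_eq_true]
    have h2 : l2.length ≤ i := by omega
    rw [List.drop_eq_nil_of_le (by omega), List.drop_eq_nil_of_le h2]
    rfl

theorem splitOn_ne_nil_char (l : List Char) : l.splitOn '*' ≠ [] := by
  induction l with
  | nil => simp
  | cons c t ih =>
    rw [List.splitOn, List.splitOnP_cons]
    cases hp : t.splitOnP (· == '*') with
    | nil => exact absurd hp (by rw [List.splitOn] at ih; exact ih)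
    | cons q qs => by_cases h : c = '*' <;> simp [h]

-- Prepending a character to the first chunk is the same as matching it at pos and shifting by one.
theorem chunksGo_modifyHead (l2 : List Char) (parts : List (List Char)) (hne : parts ≠ [])
    (c : Char) (pos : Nat) (hpos : pos < l2.length) :
    chunksGo l2 (parts.modifyHead (c :: ·)) pos
      = ((c == l2[pos]) && chunksGo l2 parts (pos + 1)) := by
  cases parts with
  | nil => exact absurd rfl hne
  | cons p ps =>
    simp only [List.modifyHead, chunksGo]
    rw [List.drop_eq_getElem_cons hpos]
    have hle : pos ≤ l2.length := le_of_lt hpos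
    have hle1 : pos + 1 ≤ l2.length := hpos
    simp only [List.isPrefixOf, hle, hle1, decide_true, Bool.true_and, List.length_cons]
    have harith : pos + (p.length + 1) + 1 = pos + 1 + p.length + 1 := by omega
    rw [harith]
    by_cases hc : (c == l2[pos]) = true <;>
      by_cases hp : p.isPrefixOf (List.drop (pos + 1) l2) = true <;>
        simp [hp] <;> congr 1

-- B's chunk loop over num.split('*') computes wmatch, given pos + len(num) = len(ref).
theorem chunksGo_eq_wmatch (l1 : List Char) :
    ∀ (l2 : List Char) (pos : Nat), pos + l1.length = l2.length →
      chunksGo l2 (l1.splitOn '*') pos = wmatch l1 (l2.drop pos) := by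
  induction l1 with
  | nil =>
    intro l2 pos hlen
    simp only [List.length_nil, Nat.add_zero] at hlen
    rw [List.drop_eq_nil_of_le (le_of_eq hlen.symm)]
    simp [List.splitOn, chunksGo, hlen, List.isPrefixOf, wmatch]
  | cons c t ih =>
    intro l2 pos hlen
    have hpos : pos < l2.length := by simp [List.length_cons] at hlen; omega
    rw [List.drop_eq_getElem_cons hpos, wmatch]
    by_cases hc : c = '*'
    · subst hc
      have hsplit : ('*' :: t).splitOn '*' = [] :: t.splitOn '*' := by
        simp [List.splitOn, List.splitOnP_cons]
      rw [hsplit]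
      simp only [chunksGo, le_of_lt hpos, List.isPrefixOf, decide_true, Bool.and_true,
        List.length_nil, Nat.add_zero, if_pos]
      rw [ih l2 (pos + 1) (by simp [List.length_cons] at hlen ⊢; omega)]
      simp
    · have hsplit : (c :: t).splitOn '*' = (t.splitOn '*').modifyHead (c :: ·) := by
        simp [List.splitOn, List.splitOnP_cons, hc]
      rw [hsplit, chunksGo_modifyHead l2 _ (splitOn_ne_nil_char t) c pos hpos,
        ih l2 (pos + 1) (by simp [List.length_cons] at hlen ⊢; omega)]
      have hstar : (c == '*') = false := by simp [hc]
      simp [hstar]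

-- ===== VERDICT =====
theorem ressemble_spec : Claim_equal_ressemble := by
  intro num ref _
  unfold Spec_ressemble ressemble ressemble_alt
  by_cases h : num.toList.length ≠ ref.toList.length
  · rw [if_pos h, if_pos h]
  · rw [if_neg h, if_neg h]
    rw [not_not] at h
    rw [ressembleGo_eq_wmatch num.toList ref.toList h 0,
      chunksGo_eq_wmatch num.toList ref.toList 0 (by omega)]
    simp
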